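-- pv_equiv track=rewrite | github.com/therealsunnyxu/charm-health-fax-counter | fax_counter/utilities.py | get_positive_and_adjacent_negative_indices
-- ===== SOURCE A (Python) =====
-- from typing import List
--
-- def get_positive_and_adjacent_negative_indices(
--     word_list: List[str],
-- ) -> tuple[List[int]]:
--     n = len(word_list)
--     positive_indices = []
--     adjacent_negative_indices = []
--
--     for i in range(n):
--         if word_list[i] > 0:
--             positive_indices.append(i)
--         elif word_list[i] == -1:
--             # check if adjacent to a positive number
--             if (i > 0 and word_list[i - 1] > 0) or (
--                 i < n - 1 and word_list[i + 1] > 0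
--             ):
--                 adjacent_negative_indices.append(i)
--
--     return positive_indices, adjacent_negative_indices
-- ===== SOURCE B (Python) =====
-- from typing import List
--
-- def get_positive_and_adjacent_negative_indices(
--     word_list: List[str],
-- ) -> tuple[List[int]]:
--     n = len(word_list)
--     positive_indices = [i for i, x in enumerate(word_list) if x > 0]
--     # generate candidates FROM the positive indices: each positive's two
--     # neighbors that exist and hold -1; dedup with a set and sort at the end
--     candidates = set()
--     for p in positive_indices:
--         for j in (p - 1, p + 1):
--             if 0 <= j < n and word_list[j] == -1:
--                 candidates.add(j)
--     return positive_indices, sorted(candidates)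
-- ===== Notes on version B (the rewrite author's own statement) =====
-- stated objective: alternative
-- what changed: Instead of scanning every index and testing its neighbors' values, B collects the positive indices and then generates the adjacent-negative candidates from those positives (p-1, p+1 holding -1), deduplicating in a set and sorting once at the end; the output is built from the positives, not by rescanning the list.
import Mathlib
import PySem

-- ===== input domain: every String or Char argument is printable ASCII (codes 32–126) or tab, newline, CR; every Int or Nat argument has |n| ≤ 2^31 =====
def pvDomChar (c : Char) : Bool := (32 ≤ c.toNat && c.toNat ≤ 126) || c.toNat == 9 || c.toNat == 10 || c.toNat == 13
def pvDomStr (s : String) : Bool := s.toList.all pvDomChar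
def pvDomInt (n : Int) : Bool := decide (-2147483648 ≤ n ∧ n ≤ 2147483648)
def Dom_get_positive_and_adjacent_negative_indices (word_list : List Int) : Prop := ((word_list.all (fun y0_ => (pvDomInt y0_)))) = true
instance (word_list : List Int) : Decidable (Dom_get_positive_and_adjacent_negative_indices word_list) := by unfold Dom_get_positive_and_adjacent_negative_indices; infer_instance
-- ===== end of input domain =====

-- B builds the adjacent-negative indices from the positive indices themselves
-- (neighbors p-1, p+1 holding -1, deduped in a set and sorted) instead of rescanning.


-- ===== PORT A =====
-- literal port of A's single loop over range(n); word_list[i] via pyGetD (every access is in range)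
def get_positive_and_adjacent_negative_indices (word_list : List Int) : List Int × List Int :=
  let n : Int := (word_list.length : Int)
  (PySem.List.pyRange 0 n 1).foldl
    (fun (st : List Int × List Int) (i : Int) =>
      if 0 < PySem.List.pyGetD word_list i 0 then (st.1 ++ [i], st.2)
      else if PySem.List.pyGetD word_list i 0 = -1 then
        if (0 < i ∧ 0 < PySem.List.pyGetD word_list (i - 1) 0) ∨
           (i < n - 1 ∧ 0 < PySem.List.pyGetD word_list (i + 1) 0) then
          (st.1, st.2 ++ [i])
        else st
      else st)
    ([], [])

-- ===== PORT B =====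
-- literal port of B: positives by comprehension, then a loop over the positives
-- generating neighbor candidates into a set, sorted at the end
def get_positive_and_adjacent_negative_indices_alt (word_list : List Int) : List Int × List Int :=
  let n : Int := (word_list.length : Int)
  let positive_indices : List Int :=
    ((PySem.List.enumerate word_list 0).filter (fun p => decide (0 < p.2))).map (·.1)
  let candidates : PySem.Set Int :=
    positive_indices.foldl
      (fun s p =>
        [p - 1, p + 1].foldl
          (fun s j =>
            if 0 ≤ j ∧ j < n ∧ PySem.List.pyGetD word_list j 0 = -1 then
              PySem.Set.add s j
            else s)
          s)
      PySem.Set.empty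
  (positive_indices, PySem.List.sorted candidates (fun x => x) false)

-- ===== PRECONDITION & SPEC =====
def Spec_get_positive_and_adjacent_negative_indices (word_list : List Int) (out : List Int × List Int) : Prop := out = get_positive_and_adjacent_negative_indices_alt word_list
instance (word_list : List Int) (out : List Int × List Int) : Decidable (Spec_get_positive_and_adjacent_negative_indices word_list out) := by unfold Spec_get_positive_and_adjacent_negative_indices; infer_instance

-- ===== CLAIM =====
def Claim_equal_get_positive_and_adjacent_negative_indices : Prop := ∀ (word_list : List Int), Dom_get_positive_and_adjacent_negative_indices word_list → Spec_get_positive_and_adjacent_negative_indices word_list (get_positive_and_adjacent_negative_indices word_list)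

-- ===== LEMMAS AND PROOFS =====

-- the positive-index list both programs compute
def pvPos (word_list : List Int) : List Int :=
  (PySem.List.pyRange 0 (word_list.length : Int) 1).filter
    (fun i => decide (0 < PySem.List.pyGetD word_list i 0))

-- A's negative-side predicate, as it appears in the loop
def pvNegP (word_list : List Int) (i : Int) : Bool :=
  decide (¬ 0 < PySem.List.pyGetD word_list i 0 ∧
  PySem.List.pyGetD word_list i 0 = -1 ∧
  ((0 < i ∧ 0 < PySem.List.pyGetD word_list (i - 1) 0) ∨
   (i < (word_list.length : Int) - 1 ∧ 0 < PySem.List.pyGetD word_list (i + 1) 0)))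

-- A's fold computed as two filters over range(n)
lemma portA_eq (word_list : List Int) :
    get_positive_and_adjacent_negative_indices word_list =
      (pvPos word_list,
       (PySem.List.pyRange 0 (word_list.length : Int) 1).filter
         (fun i => pvNegP word_list i)) := by
  unfold get_positive_and_adjacent_negative_indices pvPos pvNegP
  dsimp only
  have hstep : (fun (st : List Int × List Int) (i : Int) =>
      if 0 < PySem.List.pyGetD word_list i 0 then (st.1 ++ [i], st.2)
      else if PySem.List.pyGetD word_list i 0 = -1 then
        if (0 < i ∧ 0 < PySem.List.pyGetD word_list (i - 1) 0) ∨
           (i < (word_list.length : Int) - 1 ∧ 0 < PySem.List.pyGetD word_list (i + 1) 0) then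
          (st.1, st.2 ++ [i])
        else st
      else st)
    = (fun (st : List Int × List Int) (i : Int) =>
      (if 0 < PySem.List.pyGetD word_list i 0 then st.1 ++ [i] else st.1,
       if (¬ 0 < PySem.List.pyGetD word_list i 0 ∧
            PySem.List.pyGetD word_list i 0 = -1 ∧
            ((0 < i ∧ 0 < PySem.List.pyGetD word_list (i - 1) 0) ∨
             (i < (word_list.length : Int) - 1 ∧ 0 < PySem.List.pyGetD word_list (i + 1) 0)))
       then st.2 ++ [i] else st.2)) := by
    funext st i
    split_ifs <;> simp_all
  rw [hstep]
  rw [PySem.List.foldl_prod_mk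
        (f := fun acc i => if 0 < PySem.List.pyGetD word_list i 0 then acc ++ [i] else acc)
        (g := fun acc i => if (¬ 0 < PySem.List.pyGetD word_list i 0 ∧
            PySem.List.pyGetD word_list i 0 = -1 ∧
            ((0 < i ∧ 0 < PySem.List.pyGetD word_list (i - 1) 0) ∨
             (i < (word_list.length : Int) - 1 ∧ 0 < PySem.List.pyGetD word_list (i + 1) 0)))
          then acc ++ [i] else acc)]
  rw [PySem.List.foldl_append_ite_eq_filter, PySem.List.foldl_append_ite_eq_filter]
  simp

-- B's positive comprehension is pvPos
lemma posB_eq (word_list : List Int) :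
    ((PySem.List.enumerate word_list 0).filter (fun p => decide (0 < p.2))).map (·.1)
      = pvPos word_list := by
  unfold pvPos
  rw [PySem.List.enumerate_eq_map_pyRange (d := 0)]
  simp [List.filter_map, List.map_map, Function.comp_def]

-- one inner step of B's candidate loop, as membership
lemma mem_inner (word_list : List Int) (s : PySem.Set Int) (j x : Int) :
    x ∈ (if 0 ≤ j ∧ j < (word_list.length : Int) ∧ PySem.List.pyGetD word_list j 0 = -1 then
            PySem.Set.add s j else s)
      ↔ x ∈ s ∨ (x = j ∧ 0 ≤ j ∧ j < (word_list.length : Int) ∧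
                  PySem.List.pyGetD word_list j 0 = -1) := by
  split_ifs with h
  · rw [PySem.Set.mem_add]; tauto
  · tauto

-- membership in B's candidate fold
lemma mem_cand (word_list : List Int) (l : List Int) (s : PySem.Set Int) (x : Int) :
    x ∈ l.foldl
      (fun s p =>
        [p - 1, p + 1].foldl
          (fun s j =>
            if 0 ≤ j ∧ j < (word_list.length : Int) ∧ PySem.List.pyGetD word_list j 0 = -1 then
              PySem.Set.add s j
            else s)
          s)
      s
    ↔ x ∈ s ∨ ∃ p ∈ l, (x = p - 1 ∨ x = p + 1) ∧ 0 ≤ x ∧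
        x < (word_list.length : Int) ∧ PySem.List.pyGetD word_list x 0 = -1 := by
  induction l generalizing s with
  | nil => simp
  | cons p t ih =>
    rw [List.foldl_cons, ih]
    rw [show ∀ (s : PySem.Set Int), List.foldl
          (fun s j =>
            if 0 ≤ j ∧ j < (word_list.length : Int) ∧ PySem.List.pyGetD word_list j 0 = -1 then
              PySem.Set.add s j
            else s) s [p - 1, p + 1]
        = (fun s j =>
            if 0 ≤ j ∧ j < (word_list.length : Int) ∧ PySem.List.pyGetD word_list j 0 = -1 then
              PySem.Set.add s j
            else s)
          ((fun s j =>
            if 0 ≤ j ∧ j < (word_list.length : Int) ∧ PySem.List.pyGetD word_list j 0 = -1 then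
              PySem.Set.add s j
            else s) s (p - 1)) (p + 1)
        from fun _ => rfl]
    rw [mem_inner, mem_inner]
    constructor
    · rintro (((h | ⟨rfl, h⟩) | ⟨rfl, h⟩) | ⟨q, hq, hc⟩)
      · exact Or.inl h
      · exact Or.inr ⟨p, by simp, Or.inl rfl, h⟩
      · exact Or.inr ⟨p, by simp, Or.inr rfl, h⟩
      · exact Or.inr ⟨q, by simp [hq], hc⟩
    · rintro (h | ⟨q, hq, hside, hc⟩)
      · exact Or.inl (Or.inl (Or.inl h))
      · rcases List.mem_cons.mp hq with rfl | hq
        · rcases hside with rfl | rfl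
          · exact Or.inl (Or.inl (Or.inr ⟨rfl, hc⟩))
          · exact Or.inl (Or.inr ⟨rfl, hc⟩)
        · exact Or.inr ⟨q, hq, hside, hc⟩

-- B's candidate fold stays duplicate-free
lemma nodup_cand (word_list : List Int) (l : List Int) (s : PySem.Set Int)
    (hs : s.Nodup) :
    (l.foldl
      (fun s p =>
        [p - 1, p + 1].foldl
          (fun s j =>
            if 0 ≤ j ∧ j < (word_list.length : Int) ∧ PySem.List.pyGetD word_list j 0 = -1 then
              PySem.Set.add s j
            else s)
          s)
      s).Nodup := by
  induction l generalizing s with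
  | nil => exact hs
  | cons p t ih =>
    apply ih
    simp only [List.foldl]
    split_ifs <;> first
      | exact PySem.Set.nodup_add _ _ (PySem.Set.nodup_add _ _ hs)
      | exact PySem.Set.nodup_add _ _ hs
      | exact hs

-- membership in pvPos
lemma mem_pvPos (word_list : List Int) (p : Int) :
    p ∈ pvPos word_list ↔ 0 ≤ p ∧ p < (word_list.length : Int) ∧
      0 < PySem.List.pyGetD word_list p 0 := by
  unfold pvPos
  simp [List.mem_filter, PySem.List.mem_pyRange_one, and_assoc]

-- the A-side filtered list and B's sorted candidate set are the same list
lemma negs_eq (word_list : List Int) :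
    PySem.List.sorted
      (pvPos word_list |>.foldl
        (fun s p =>
          [p - 1, p + 1].foldl
            (fun s j =>
              if 0 ≤ j ∧ j < (word_list.length : Int) ∧ PySem.List.pyGetD word_list j 0 = -1 then
                PySem.Set.add s j
              else s)
            s)
        PySem.Set.empty)
      (fun x => x) false
    = (PySem.List.pyRange 0 (word_list.length : Int) 1).filter
        (fun i => pvNegP word_list i) := by
  apply PySem.List.sorted_eq_of_perm_of_pairwise_lt
  · -- permutation: both nodup with the same members
    apply (List.perm_ext_iff_of_nodup ?_ ?_).mpr
    · intro x
      rw [List.mem_filter, mem_cand]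
      simp only [PySem.List.mem_pyRange_one, decide_eq_true_eq, pvNegP]
      constructor
      · rintro ⟨⟨hx0, hxn⟩, _, hneg, hadj⟩
        refine Or.inr ?_
        rcases hadj with ⟨hx, hv⟩ | ⟨hx, hv⟩
        · exact ⟨x - 1, (mem_pvPos _ _).mpr ⟨by omega, by omega, hv⟩,
            Or.inr (by ring), hx0, hxn, hneg⟩
        · exact ⟨x + 1, (mem_pvPos _ _).mpr ⟨by omega, by omega, hv⟩,
            Or.inl (by ring), hx0, hxn, hneg⟩
      · rintro (h | ⟨p, hp, hside, hx0, hxn, hneg⟩)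
        · exact absurd h (by simp [PySem.Set.empty])
        · rw [mem_pvPos] at hp
          refine ⟨⟨hx0, hxn⟩, by omega, hneg, ?_⟩
          rcases hside with rfl | rfl
          · exact Or.inr ⟨by omega, by have := hp.2.2; simpa using this⟩
          · exact Or.inl ⟨by omega, by have := hp.2.2; simpa using this⟩
    · exact List.Nodup.filter _ (PySem.List.nodup_pyRange_one 0 (word_list.length : Int))
    · exact nodup_cand _ _ _ (by simp [PySem.Set.empty])
  · exact List.Pairwise.filter _ (PySem.List.pairwise_lt_pyRange_one 0 (word_list.length : Int))

-- ===== VERDICT =====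
theorem get_positive_and_adjacent_negative_indices_spec : Claim_equal_get_positive_and_adjacent_negative_indices := by
  intro word_list _
  unfold Spec_get_positive_and_adjacent_negative_indices
  rw [portA_eq]
  unfold get_positive_and_adjacent_negative_indices_alt
  dsimp only
  rw [posB_eq, negs_eq]
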